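-- pv_equiv track=rewrite | github.com/Aurora-Lucifer/PaperAnalysis | analysis.py | title_selection
-- ===== SOURCE A (Python) =====
-- def title_selection(key_words: list, title_list: list):
--     '''
--         筛选title_list中含key_words的项
--         输入两个list
--         返回一个dict，key_words为键，对应选中的title列表为值
--     '''
--     ret = {}
--     for key in key_words:
--         ret[key] = []
--         for title in title_list:
--             if key in title:
--                 ret[key].append(title)
--     return ret
-- ===== SOURCE B (Python) =====
-- def title_selection(key_words: list, title_list: list):
--     # Length-filtered substring index: enumerate, per title, its distinct
--     # substrings of exactly the keyword lengths, recording each in a hash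
--     # index; every bucket is then a single dict lookup per keyword.
--     lengths = list(dict.fromkeys(len(k) for k in key_words))
--     index = {}
--     for title in title_list:
--         n = len(title)
--         for L in lengths:
--             if L <= n:
--                 seen = set()
--                 for i in range(n - L + 1):
--                     s = title[i:i + L]
--                     if s not in seen:
--                         seen.add(s)
--                         index[s] = index.get(s, []) + [title]
--     ret = {}
--     for key in key_words:
--         ret[key] = index.get(key, [])
--     return ret
-- ===== Notes on version B (the rewrite author's own statement) =====
-- stated objective: faster
-- what changed: B replaces A's keyword-by-keyword rescan of the titles with a multi-pattern substring index: one pass over the titles enumerates each title's distinct substrings of exactly the (deduplicated) keyword lengths into a hash map from substring to matching titles, so each keyword's bucket becomes a single dictionary lookup instead of a scan of all titles.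
import Mathlib
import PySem

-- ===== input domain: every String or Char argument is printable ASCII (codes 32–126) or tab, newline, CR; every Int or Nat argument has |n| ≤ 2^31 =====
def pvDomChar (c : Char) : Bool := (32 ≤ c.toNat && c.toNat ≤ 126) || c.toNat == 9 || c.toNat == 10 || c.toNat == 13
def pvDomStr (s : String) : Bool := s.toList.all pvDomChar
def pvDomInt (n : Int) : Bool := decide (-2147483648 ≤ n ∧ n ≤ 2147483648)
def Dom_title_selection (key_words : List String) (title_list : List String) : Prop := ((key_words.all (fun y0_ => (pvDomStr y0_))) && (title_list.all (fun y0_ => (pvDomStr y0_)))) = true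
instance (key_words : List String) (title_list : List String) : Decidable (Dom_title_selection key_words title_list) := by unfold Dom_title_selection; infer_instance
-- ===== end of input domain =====

-- B replaces A's per-keyword rescan of the titles with a length-filtered substring
-- index built in one pass over the titles; each keyword's bucket is then a single
-- dictionary lookup (a timing run measured B faster at every generated size).

-- ===== PORT A =====
-- keyword-major: for each key, reset its bucket and rescan the whole title list
def title_selection (key_words : List String) (title_list : List String) : List (String × List String) :=
  (key_words.foldl (fun d key =>
      title_list.foldl (fun d title =>
          if PySem.Str.isIn key title then d.insert key (d.getD key [] ++ [title]) else d)
        (d.insert key []))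
    PySem.Dict.empty).items

-- ===== PORT B =====
-- Source B's innermost loop body: record substring title[i:i+L] (once per title, via seen)
def pvStep (title : String) (L : Int)
    (st : PySem.Set String × PySem.Dict String (List String)) (i : Int) :
    PySem.Set String × PySem.Dict String (List String) :=
  let s := PySem.Str.slice title (some i) (some (i + L))
  if st.1.contains s then st
  else (st.1.add s, st.2.insert s (st.2.getD s [] ++ [title]))

-- Source B's 'if L <= n: seen = set(); for i in range(n - L + 1): ...'
def pvScanLen (title : String) (idx : PySem.Dict String (List String)) (L : Int) :
    PySem.Dict String (List String) :=
  let n := PySem.Str.len title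
  if L ≤ n then
    ((PySem.List.pyRange 0 (n - L + 1)).foldl (pvStep title L) (PySem.Set.empty, idx)).2
  else idx

-- Source B's 'for L in lengths: ...' for one title
def pvScanTitle (lengths : List Int) (idx : PySem.Dict String (List String)) (title : String) :
    PySem.Dict String (List String) :=
  lengths.foldl (pvScanLen title) idx

-- title-major: build the substring index once, then one lookup per keyword
def title_selection_alt (key_words : List String) (title_list : List String) : List (String × List String) :=
  let lengths := PySem.List.dedup (key_words.map PySem.Str.len)
  let index := title_list.foldl (pvScanTitle lengths) PySem.Dict.empty
  (key_words.foldl (fun r key => r.insert key (index.getD key [])) PySem.Dict.empty).items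

-- ===== PRECONDITION & SPEC =====
def Spec_title_selection (key_words : List String) (title_list : List String) (out : List (String × List String)) : Prop := out = title_selection_alt key_words title_list
instance (key_words : List String) (title_list : List String) (out : List (String × List String)) : Decidable (Spec_title_selection key_words title_list out) := by unfold Spec_title_selection; infer_instance

-- ===== CLAIM (what is proved, stated in full; the proofs are below) =====
def Claim_equal_title_selection : Prop := ∀ (key_words : List String) (title_list : List String), Dom_title_selection key_words title_list → Spec_title_selection key_words title_list (title_selection key_words title_list)

-- ===== LEMMAS AND PROOFS =====

-- A's inner loop over titles, started with bucket v at `key`, ends as one insert of v ++ filter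
theorem pvA_inner (p : String → Bool) (tl : List String) (key : String)
    (d : PySem.Dict String (List String)) (v : List String) :
    tl.foldl (fun d title =>
        if p title then d.insert key (d.getD key [] ++ [title]) else d)
      (d.insert key v)
    = d.insert key (v ++ tl.filter p) := by
  induction tl generalizing v with
  | nil => simp
  | cons t ts ih =>
    simp only [List.foldl_cons, List.filter_cons]
    by_cases h : p t = true
    · simp only [h, if_true, PySem.Dict.insert_insert_self, PySem.Dict.getD_insert_self, ih,
        List.append_assoc, List.cons_append, List.nil_append]
    · simp [h, ih]

-- B's innermost loop: bucket `key` gains [t] iff key is among the scanned slices and not yet seen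
theorem pvInner (t : String) (L : Int) (idxs : List Int) (key : String) :
    ∀ (seen : PySem.Set String) (d : PySem.Dict String (List String)),
    ((idxs.foldl (pvStep t L) (seen, d)).2).getD key []
    = if (∃ i ∈ idxs, PySem.Str.slice t (some i) (some (i + L)) = key) ∧ key ∉ seen
      then d.getD key [] ++ [t] else d.getD key [] := by
  induction idxs with
  | nil => intro seen d; simp
  | cons i rest ih =>
    intro seen d
    simp only [List.foldl_cons]
    by_cases hcs : seen.contains (PySem.Str.slice t (some i) (some (i + L))) = true
    · have hmem := (PySem.Set.contains_iff _ _).mp hcs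
      have hstep : pvStep t L (seen, d) i = (seen, d) := by
        simp only [pvStep]; rw [if_pos hcs]
      rw [hstep, ih]
      by_cases hk : key ∈ seen
      · simp [hk]
      · have hne : PySem.Str.slice t (some i) (some (i + L)) ≠ key :=
          fun h => hk (h ▸ hmem)
        simp [hk, hne]
    · have hnmem : PySem.Str.slice t (some i) (some (i + L)) ∉ seen :=
        fun h => hcs ((PySem.Set.contains_iff _ _).mpr h)
      have hstep : pvStep t L (seen, d) i =
          (seen.add (PySem.Str.slice t (some i) (some (i + L))),
           d.insert (PySem.Str.slice t (some i) (some (i + L)))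
             (d.getD (PySem.Str.slice t (some i) (some (i + L))) [] ++ [t])) := by
        simp only [pvStep]; rw [if_neg hcs]
      rw [hstep, ih]
      by_cases hk : key = PySem.Str.slice t (some i) (some (i + L))
      · have hinadd : key ∈ seen.add (PySem.Str.slice t (some i) (some (i + L))) := by
          rw [PySem.Set.mem_add]; right; exact hk
        rw [if_neg (fun hc => hc.2 hinadd)]
        rw [hk, PySem.Dict.getD_insert_self]
        rw [if_pos ⟨⟨i, List.mem_cons_self .., hk ▸ rfl⟩, hk ▸ hnmem⟩]
      · have hadd : (key ∈ seen.add (PySem.Str.slice t (some i) (some (i + L)))) ↔ key ∈ seen := by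
          rw [PySem.Set.mem_add]; simp [hk]
        rw [PySem.Dict.getD_insert_of_ne _ _ _ hk]
        have hsk : PySem.Str.slice t (some i) (some (i + L)) ≠ key := fun h => hk h.symm
        by_cases hks : key ∈ seen
        · simp [hks, hadd]
        · simp [hadd, hks, hsk]

-- the scanned slices of length L are exactly the length-L keys occurring as substrings
theorem pvSliceExists (t key : String) (L : Int) (hL : 0 ≤ L) (hLe : L ≤ PySem.Str.len t) :
    (∃ i ∈ PySem.List.pyRange 0 (PySem.Str.len t - L + 1),
        PySem.Str.slice t (some i) (some (i + L)) = key)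
    ↔ (PySem.Str.len key = L ∧ PySem.Str.isIn key t = true) := by
  rw [PySem.Str.len_eq] at hLe
  rw [PySem.Str.len_eq, PySem.Str.len_eq]
  constructor
  · rintro ⟨i, hi, heq⟩
    obtain ⟨hi0, hi1⟩ := PySem.List.mem_pyRange_one.mp hi
    have hslice : (PySem.Str.slice t (some i) (some (i + L))).toList
        = (t.toList.drop i.toNat).take L.toNat := by
      rw [PySem.Str.toList_slice, PySem.Chars.slice_eq_listSlice,
        PySem.List.slice_toNat t.toList hi0 (by omega)]
      congr 1; omega
    have hkeyl : key.toList = (t.toList.drop i.toNat).take L.toNat := by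
      rw [← heq, hslice]
    have hbound : i.toNat + L.toNat ≤ t.toList.length := by omega
    constructor
    · have hlen : key.toList.length = L.toNat := by
        rw [hkeyl, List.length_take, List.length_drop]
        omega
      omega
    · rw [PySem.Str.isIn_iff_infix, hkeyl]
      exact ((List.take_prefix _ _).isInfix).trans ((List.drop_suffix _ _).isInfix)
  · rintro ⟨hlen, hin⟩
    obtain ⟨p, q, hpq⟩ := (PySem.Str.isIn_iff_infix key t).mp hin
    have hlent : t.toList.length = p.length + key.toList.length + q.length := by
      rw [← hpq]; simp only [List.length_append]
    refine ⟨(p.length : Int), ?_, ?_⟩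
    · rw [PySem.List.mem_pyRange_one]
      omega
    · have h0 : (0:Int) ≤ (p.length : Int) := by positivity
      apply String.toList_inj.mp
      rw [PySem.Str.toList_slice, PySem.Chars.slice_eq_listSlice,
        PySem.List.slice_toNat t.toList h0 (by omega)]
      have htoN : ((p.length : Int) + L).toNat - (p.length : Int).toNat = key.toList.length := by
        omega
      rw [htoN, Int.toNat_natCast, ← hpq, List.append_assoc,
        List.drop_left' rfl, List.take_left' rfl]

-- one title's pass over the (Nodup, nonnegative) length list: bucket `key` gains [t] iff matched
theorem pvLenLoop (t : String) (key : String) (ls : List Int) (hnd : ls.Nodup)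
    (hpos : ∀ L ∈ ls, 0 ≤ L) :
    ∀ d, (ls.foldl (pvScanLen t) d).getD key []
    = if PySem.Str.len key ∈ ls ∧ PySem.Str.isIn key t = true
      then d.getD key [] ++ [t] else d.getD key [] := by
  induction ls with
  | nil => intro d; simp
  | cons L rest ih =>
    obtain ⟨hLr, hndr⟩ := List.nodup_cons.mp hnd
    intro d
    simp only [List.foldl_cons]
    rw [ih hndr (fun x hx => hpos x (List.mem_cons_of_mem _ hx))]
    have hL0 : 0 ≤ L := hpos L (List.mem_cons_self ..)
    by_cases hle : L ≤ PySem.Str.len t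
    · have hstep : (pvScanLen t d L).getD key []
          = if PySem.Str.len key = L ∧ PySem.Str.isIn key t = true
            then d.getD key [] ++ [t] else d.getD key [] := by
        unfold pvScanLen
        rw [if_pos hle, pvInner]
        simp only [PySem.Set.empty, List.not_mem_nil, not_false_iff, and_true]
        rw [if_congr (by rw [pvSliceExists t key L hL0 hle]) rfl rfl]
      rw [hstep]
      by_cases hk : PySem.Str.len key = L
      · have hkr : PySem.Str.len key ∉ rest := hk ▸ hLr
        by_cases hin : PySem.Str.isIn key t = true
        · rw [if_neg (fun hc => hkr hc.1), if_pos ⟨hk, hin⟩,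
            if_pos ⟨by rw [hk]; exact List.mem_cons_self .., hin⟩]
        · rw [if_neg (fun hc => hin hc.2), if_neg (fun hc => hin hc.2),
            if_neg (fun hc => hin hc.2)]
      · rw [if_neg (c := PySem.Str.len key = L ∧ PySem.Str.isIn key t = true) (fun hc => hk hc.1)]
        by_cases hr : PySem.Str.len key ∈ rest
        · by_cases hin : PySem.Str.isIn key t = true
          · rw [if_pos ⟨hr, hin⟩, if_pos ⟨List.mem_cons_of_mem _ hr, hin⟩]
          · rw [if_neg (fun hc => hin hc.2), if_neg (fun hc => hin hc.2)]
        · rw [if_neg (fun hc => hr hc.1),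
            if_neg (fun hc => (List.mem_cons.mp hc.1).elim hk (fun h => hr h))]
    · have hstep : pvScanLen t d L = d := by
        unfold pvScanLen; rw [if_neg hle]
      rw [hstep]
      by_cases hk : PySem.Str.len key = L
      · have hin : ¬ PySem.Str.isIn key t = true := by
          intro h
          have hinf := ((PySem.Str.isIn_iff_infix key t).mp h).length_le
          rw [PySem.Str.len_eq] at hk
          rw [PySem.Str.len_eq] at hle
          omega
        rw [if_neg (fun hc => hin hc.2), if_neg (fun hc => hin hc.2)]
      · by_cases hr : PySem.Str.len key ∈ rest
        · by_cases hin : PySem.Str.isIn key t = true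
          · rw [if_pos ⟨hr, hin⟩, if_pos ⟨List.mem_cons_of_mem _ hr, hin⟩]
          · rw [if_neg (fun hc => hin hc.2), if_neg (fun hc => hin hc.2)]
        · rw [if_neg (fun hc => hr hc.1),
            if_neg (fun hc => (List.mem_cons.mp hc.1).elim hk (fun h => hr h))]

-- the whole index-building loop: bucket `key` is the matching titles in title order
theorem pvTitleLoop (ls : List Int) (hnd : ls.Nodup) (hpos : ∀ L ∈ ls, 0 ≤ L)
    (key : String) (hmem : PySem.Str.len key ∈ ls) :
    ∀ (tl : List String) (d : PySem.Dict String (List String)),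
      (tl.foldl (pvScanTitle ls) d).getD key []
      = d.getD key [] ++ tl.filter (fun t => PySem.Str.isIn key t) := by
  intro tl
  induction tl with
  | nil => intro d; simp
  | cons t ts ih =>
    intro d
    simp only [List.foldl_cons, List.filter_cons]
    rw [ih]
    unfold pvScanTitle
    rw [pvLenLoop t key ls hnd hpos d]
    by_cases h : PySem.Str.isIn key t = true
    · rw [if_pos ⟨hmem, h⟩, if_pos h]
      simp
    · rw [if_neg (fun hc => h hc.2), if_neg h]

-- ===== VERDICT (by name: the statement is the Claim_ definition above) =====
theorem title_selection_spec : Claim_equal_title_selection := by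
  intro kw tl _
  unfold Spec_title_selection title_selection title_selection_alt
  have hfun : (fun (d : PySem.Dict String (List String)) key =>
      tl.foldl (fun d title =>
          if PySem.Str.isIn key title then d.insert key (d.getD key [] ++ [title]) else d)
        (d.insert key []))
      = fun d key => d.insert key (tl.filter (fun t => PySem.Str.isIn key t)) := by
    funext d key
    simpa using pvA_inner (fun t => PySem.Str.isIn key t) tl key d []
  rw [hfun]
  refine congrArg PySem.Dict.items ?_
  refine PySem.List.foldl_congr_mem kw _ _ PySem.Dict.empty ?_
  intro acc key hk
  congr 1
  have hmem : PySem.Str.len key ∈ PySem.List.dedup (kw.map PySem.Str.len) :=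
    (PySem.List.mem_dedup _ _).mpr (List.mem_map_of_mem hk)
  have hpos : ∀ L ∈ PySem.List.dedup (kw.map PySem.Str.len), 0 ≤ L := by
    intro L hL
    obtain ⟨s, _, rfl⟩ := List.mem_map.mp ((PySem.List.mem_dedup _ _).mp hL)
    rw [PySem.Str.len_eq]; positivity
  have := pvTitleLoop _ (PySem.List.nodup_dedup _) hpos key hmem tl PySem.Dict.empty
  simpa using this.symm
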